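-- pv_equiv track=rewrite | github.com/tomflannaghan/blaise | src/blaise/ciphers/playfair.py | _remove_fill
-- ===== SOURCE A (Python) =====
-- def _remove_fill(plaintext, fill_char, alt_fill_char):
--     """Heuristically removes fill characters added by _to_bigrams. Approximate inverse."""
--     if len(plaintext) % 2 != 0:
--         raise ValueError(f"Expected even length text: {plaintext}")
--
--     bigrams = list(zip(plaintext[::2], plaintext[1::2]))
--     result = []
--     for i in range(len(bigrams)):
--         b = bigrams[i]
--         # Repeating the final bigram gives generally sensible behaviour.
--         next_b = b if i == len(bigrams) - 1 else bigrams[i + 1]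
--         if b[1] == fill_char and b[0] == next_b[0]:
--             result.append(b[0])
--         elif b[1] == alt_fill_char and b[0] == fill_char and next_b[0] == fill_char:
--             result.append(b[0])
--         else:
--             result.extend(b)
--     return "".join(result)
-- ===== SOURCE B (Python) =====
-- def _remove_fill(plaintext, fill_char, alt_fill_char):
--     """Mark-and-filter: never forms bigrams or assembles output pieces.  Computes a
--     per-position 'deletable' predicate over odd indices of the original string and
--     returns the string filtered by it."""
--     if len(plaintext) % 2 != 0:
--         raise ValueError(f"Expected even length text: {plaintext}")
--     n = len(plaintext)
--
--     def deletable(j):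
--         # j is odd; the character left of it plays Playfair 'a', the one two to
--         # the right (or 'a' itself at the end) plays the next bigram's first char.
--         a = plaintext[j - 1]
--         nf = plaintext[j + 1] if j + 1 < n else a
--         return (plaintext[j] == fill_char and a == nf) or (
--             plaintext[j] == alt_fill_char and a == fill_char and nf == fill_char)
--
--     return "".join(c for j, c in enumerate(plaintext)
--                    if j % 2 == 0 or not deletable(j))
-- ===== Notes on version B (the rewrite author's own statement) =====
-- stated objective: alternative
-- what changed: Replaces A's bigram-list construction and piece-by-piece emission loop by a mark-and-filter pass: a 'deletable' predicate over odd indices of the original string, which is then filtered in place (no bigram list, no result assembly).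
import Mathlib
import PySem

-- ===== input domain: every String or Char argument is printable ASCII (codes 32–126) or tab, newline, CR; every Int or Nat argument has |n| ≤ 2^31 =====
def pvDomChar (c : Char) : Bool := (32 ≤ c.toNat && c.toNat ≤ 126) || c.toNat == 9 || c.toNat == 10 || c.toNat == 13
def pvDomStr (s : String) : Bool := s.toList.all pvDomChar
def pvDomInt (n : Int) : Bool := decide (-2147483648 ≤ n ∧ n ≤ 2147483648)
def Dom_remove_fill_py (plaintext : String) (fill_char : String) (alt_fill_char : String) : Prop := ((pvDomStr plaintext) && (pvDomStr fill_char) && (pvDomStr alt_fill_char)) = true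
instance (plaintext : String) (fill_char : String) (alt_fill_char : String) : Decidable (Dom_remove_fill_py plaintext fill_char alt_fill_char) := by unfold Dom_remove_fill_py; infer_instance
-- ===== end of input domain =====

-- B replaces A's bigram-list-and-emit loop by a mark-and-filter pass over the original
-- string (a 'deletable' predicate over odd indices, then an index filter); return values
-- proved equal on even-length inputs (odd length: A raises ValueError, excluded by Pre_).

-- ===== PORT A =====

-- Python's `b[1] == fill_char`: a one-character string compared to a string.
def pvCharStrEq (c : Char) (s : String) : Bool := String.ofList [c] == s

-- plaintext[::2] / plaintext[1::2] (step-2 slices), ported by hand, exact on all lists: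
-- pvEvery2 takes indices 0,2,4,…; pvEvery2Odd takes 1,3,5,…
mutual
def pvEvery2 : List Char → List Char
  | [] => []
  | a :: t => a :: pvEvery2Odd t
def pvEvery2Odd : List Char → List Char
  | [] => []
  | _ :: t => pvEvery2 t
end

-- the `for i in range(len(bigrams))` loop with its lookahead `next_b` (self for the
-- last bigram), as the obvious structural recursion over the bigram list; `result`
-- is built by append, branches in Python's order.
def pvLoopA (fill alt : String) : List (Char × Char) → List Char
  | [] => []
  | (a, b) :: rest =>
    let nf : Char := match rest with
      | [] => a                 -- i == len(bigrams) - 1 : next_b = b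
      | (c, _) :: _ => c        -- next_b = bigrams[i + 1]
    (if pvCharStrEq b fill && (a == nf) then [a]
     else if pvCharStrEq b alt && pvCharStrEq a fill && pvCharStrEq nf fill then [a]
     else [a, b]) ++ pvLoopA fill alt rest

def remove_fill_py (plaintext : String) (fill_char : String) (alt_fill_char : String) : String :=
  if plaintext.toList.length % 2 ≠ 0 then ""  -- Python raises ValueError; outside Pre_
  else
    let bigrams := List.zip (pvEvery2 plaintext.toList) (pvEvery2Odd plaintext.toList)
    String.ofList (pvLoopA fill_char alt_fill_char bigrams)

-- ===== PORT B =====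

-- B's `deletable(j)` predicate (j odd): plaintext[j-1], plaintext[j], plaintext[j+1]
-- looked up in the full original string, with the end-of-string fallback.
def pvDelB (p : List Char) (fill alt : String) (n j : Nat) : Bool :=
  let a := p.getD (j - 1) ' '
  let cj := p.getD j ' '
  let nf := if j + 1 < n then p.getD (j + 1) ' ' else a
  (pvCharStrEq cj fill && (a == nf)) ||
    (pvCharStrEq cj alt && pvCharStrEq a fill && pvCharStrEq nf fill)

def remove_fill_py_alt (plaintext : String) (fill_char : String) (alt_fill_char : String) : String :=
  if plaintext.toList.length % 2 ≠ 0 then ""  -- same ValueError guard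
  else
    let p := plaintext.toList
    let n := p.length
    -- "".join(c for j, c in enumerate(plaintext) if j % 2 == 0 or not deletable(j))
    String.ofList (p.zipIdx.filterMap (fun cj =>
      if cj.2 % 2 == 0 || !(pvDelB p fill_char alt_fill_char n cj.2) then some cj.1 else none))

-- ===== PRECONDITION & SPEC =====
-- Pre_ excludes odd-length plaintext, on which A raises ValueError.
def Pre_remove_fill_py (plaintext : String) (fill_char : String) (alt_fill_char : String) : Prop :=
  plaintext.toList.length % 2 = 0
instance (plaintext : String) (fill_char : String) (alt_fill_char : String) : Decidable (Pre_remove_fill_py plaintext fill_char alt_fill_char) := by unfold Pre_remove_fill_py; infer_instance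

def pvWitness_remove_fill_py : String × String × String := ("heXllo", "X", "Q")

def Spec_remove_fill_py (plaintext : String) (fill_char : String) (alt_fill_char : String) (out : String) : Prop := out = remove_fill_py_alt plaintext fill_char alt_fill_char
instance (plaintext : String) (fill_char : String) (alt_fill_char : String) (out : String) : Decidable (Spec_remove_fill_py plaintext fill_char alt_fill_char out) := by unfold Spec_remove_fill_py; infer_instance

-- ===== CLAIM (what is proved, stated in full; the proofs are below) =====
def Claim_equal_remove_fill_py : Prop := ∀ (plaintext : String) (fill_char : String) (alt_fill_char : String), Dom_remove_fill_py plaintext fill_char alt_fill_char → Pre_remove_fill_py plaintext fill_char alt_fill_char → Spec_remove_fill_py plaintext fill_char alt_fill_char (remove_fill_py plaintext fill_char alt_fill_char)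

-- ===== LEMMAS AND PROOFS =====

-- the bigram chunking that B never forms, used only to relate the two ports
def pvPairsB : List Char → List (Char × Char)
  | a :: b :: t => (a, b) :: pvPairsB t
  | _ => []

theorem pvZip_eq_pairsB : ∀ l : List Char, l.length % 2 = 0 →
    List.zip (pvEvery2 l) (pvEvery2Odd l) = pvPairsB l
  | [], _ => by simp [pvEvery2, pvEvery2Odd, pvPairsB]
  | [a], h => by simp at h
  | a :: b :: t, h => by
    have ih := pvZip_eq_pairsB t (by simp only [List.length_cons] at h; omega)
    simp [pvEvery2, pvEvery2Odd, pvPairsB, ih]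

theorem pvGetD_of_drop (p : List Char) (k : Nat) (a : Char) (l : List Char)
    (h : p.drop k = a :: l) : p.getD k ' ' = a := by
  have h0 : p[k]? = some a := by
    rw [show k = k + 0 from rfl, ← List.getElem?_drop, h]; rfl
  simp [List.getD, h0]

theorem pvFilter_eq (fill alt : String) (p : List Char) :
    ∀ (t : List Char) (k : Nat), k % 2 = 0 → t.length % 2 = 0 → p.drop k = t →
      (t.zipIdx k).filterMap (fun cj =>
          if cj.2 % 2 == 0 || !(pvDelB p fill alt p.length cj.2) then some cj.1 else none)
        = pvLoopA fill alt (pvPairsB t)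
  | [], _, _, _, _ => by simp [pvPairsB, pvLoopA]
  | [a], _, _, hlen, _ => by simp at hlen
  | a :: b :: t, k, hk, hlen, hdrop => by
    have hdrop2 : p.drop (k + 2) = t := by
      have h := congrArg (List.drop 2) hdrop
      rw [List.drop_drop] at h
      simpa using h
    have hlen2 : t.length % 2 = 0 := by simp only [List.length_cons] at hlen; omega
    have ih := pvFilter_eq fill alt p t (k + 2) (by omega) hlen2 hdrop2
    have hlenp : p.length = k + 2 + t.length := by
      have h2 : k ≤ p.length := by
        by_contra hc
        have hnil : p.drop k = [] := List.drop_eq_nil_of_le (by omega)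
        rw [hdrop] at hnil; simp at hnil
      have h1 : (p.drop k).length = p.length - k := by simp
      rw [hdrop] at h1; simp only [List.length_cons] at h1; omega
    have hga : p.getD k ' ' = a := pvGetD_of_drop p k a _ hdrop
    have hgb : p.getD (k + 1) ' ' = b := by
      apply pvGetD_of_drop p (k + 1) b t
      have h := congrArg (List.drop 1) hdrop
      rw [List.drop_drop] at h
      simpa using h
    have hkb : (k % 2 == 0) = true := by simp [hk]
    have hk1 : ((k + 1) % 2 == 0) = false := by
      rw [Nat.add_mod, hk]; rfl
    -- unfold the two leading elements of both sides
    rw [List.zipIdx_cons, List.zipIdx_cons, List.filterMap_cons, List.filterMap_cons]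
    rw [show k + 1 + 1 = k + 2 from rfl, ih]
    match t, hlen2, hdrop2, hlenp with
    | [], _, _, hlenp =>
      have hn : ¬ (k + 1 + 1 < p.length) := by
        simp only [List.length_nil] at hlenp; omega
      have hdelEq : pvDelB p fill alt p.length (k + 1) =
          ((pvCharStrEq b fill && (a == a)) ||
            (pvCharStrEq b alt && pvCharStrEq a fill && pvCharStrEq a fill)) := by
        unfold pvDelB
        simp only [Nat.add_sub_cancel, hga, hgb, if_neg hn]
      simp only [hkb, Bool.true_or, if_true, hk1, Bool.false_or, hdelEq]
      cases h1 : pvCharStrEq b fill <;> cases h2 : pvCharStrEq b alt <;>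
        cases h3 : pvCharStrEq a fill <;>
          simp [pvPairsB, pvLoopA, h1, h2, h3]
    | c :: d :: t'', _, hdrop2, hlenp =>
      have hn : k + 1 + 1 < p.length := by
        simp only [List.length_cons] at hlenp; omega
      have hgc : p.getD (k + 1 + 1) ' ' = c := pvGetD_of_drop p (k + 2) c _ hdrop2
      have hdelEq : pvDelB p fill alt p.length (k + 1) =
          ((pvCharStrEq b fill && (a == c)) ||
            (pvCharStrEq b alt && pvCharStrEq a fill && pvCharStrEq c fill)) := by
        unfold pvDelB
        simp only [Nat.add_sub_cancel, hga, hgb, if_pos hn, hgc]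
      simp only [hkb, Bool.true_or, if_true, hk1, Bool.false_or, hdelEq]
      cases h1 : pvCharStrEq b fill <;> cases h2 : (a == c) <;>
        cases h3 : pvCharStrEq b alt <;> cases h4 : pvCharStrEq a fill <;>
          cases h5 : pvCharStrEq c fill <;>
            simp [pvPairsB, pvLoopA, h1, h2, h3, h4, h5]
    | [c], hlen2, _, _ => simp at hlen2

-- ===== VERDICT (by name: the statement is the Claim_ definition above) =====
theorem remove_fill_py_spec : Claim_equal_remove_fill_py := by
  intro p fill alt _hd hpre
  unfold Spec_remove_fill_py remove_fill_py remove_fill_py_alt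
  have hpre' : p.toList.length % 2 = 0 := hpre
  simp only [hpre', ne_eq, not_true_eq_false, if_false]
  rw [pvZip_eq_pairsB p.toList hpre']
  rw [pvFilter_eq fill alt p.toList p.toList 0 (by omega) hpre' (by simp)]
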